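-- pv_equiv track=rewrite | github.com/Rubenssio/ACA-ML0-Course | Homework_5/palindrome_reconstruction.py | make_palindrome1
-- ===== SOURCE A (Python) =====
-- def make_palindrome1(txt):
--     """using dictionary"""
--
--     letter_counts = {}
--
--     # let's make a dictionary with all the letters in the text (with counts)
--     for char in txt:
--         if char in letter_counts:
--             letter_counts[char] += 1
--         else:
--             letter_counts[char] = 1
--
--     odd_counts = 0
--     impossible = False
--     middle_letter = None
--
--     # let's see if there is more than one letter repeated odd times
--     for letter, count in letter_counts.items():
--         if count % 2 != 0:
--             odd_counts += 1
--             middle_letter = letter  # remembering the letter with odd count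
--             if odd_counts > 1:
--                 impossible = True
--                 break
--
--     if impossible:
--         return 'impossible'
--     else:
--         sorted_letters = sorted(letter_counts)
--
--         palindrome_list = []
--
--         # creating the first half of the palindrome as a list
--         for letter in sorted_letters:
--             palindrome_list.append(letter * (letter_counts[letter] // 2))
--
--         # converting the list into a string
--         palindrome_base = ''.join(palindrome_list)
--
--         return ''.join((
--             palindrome_base,
--             middle_letter,
--             palindrome_base[::-1]
--         ))
-- ===== SOURCE B (Python) =====
-- def make_palindrome1(txt):
--     """sort the text and pair up adjacent equal letters in one pass"""
--     s = sorted(txt)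
--     half = []
--     middle = None
--     i = 0
--     n = len(s)
--     while i < n:
--         if i + 1 < n and s[i] == s[i + 1]:
--             half.append(s[i])
--             i += 2
--         else:
--             if middle is not None:
--                 return 'impossible'
--             middle = s[i]
--             i += 1
--     base = ''.join(half)
--     return base + (middle or '') + base[::-1]
-- ===== Notes on version B (the rewrite author's own statement) =====
-- stated objective: alternative
-- what changed: B never counts letters: it sorts the whole text and makes a single pairing pass over the sorted characters, consuming adjacent equal pairs into the half and treating any unpaired character as the middle (a second unpaired one means 'impossible'), instead of A's count dictionary, parity scan and per-letter half construction.
-- outside the precondition, e.g. on make_palindrome1(''): A raises TypeError, B returns ''; on make_palindrome1('aa'): A raises TypeError, B returns 'aa'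
-- crash fix: On inputs where every letter occurs an even number of times (including the empty string) A raises TypeError (''.join of the None middle letter); B returns the even-length palindrome. — e.g. on make_palindrome1("aa"): A raises TypeError, B returns "aa"
import Mathlib
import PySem

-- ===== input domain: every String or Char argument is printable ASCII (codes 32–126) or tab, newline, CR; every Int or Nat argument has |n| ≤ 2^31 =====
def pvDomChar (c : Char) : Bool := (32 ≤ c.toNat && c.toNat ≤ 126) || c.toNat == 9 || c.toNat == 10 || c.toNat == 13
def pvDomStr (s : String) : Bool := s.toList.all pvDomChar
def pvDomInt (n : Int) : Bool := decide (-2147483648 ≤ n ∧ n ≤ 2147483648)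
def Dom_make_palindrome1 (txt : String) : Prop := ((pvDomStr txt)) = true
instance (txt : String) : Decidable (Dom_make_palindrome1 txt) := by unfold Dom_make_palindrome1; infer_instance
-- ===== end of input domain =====

-- B replaces A's counting dictionary and parity scan by one pairing pass over the sorted text
-- ('alternative' objective). Equivalence is claimed on inputs with at least one odd-count letter (Pre_):
-- on all-even inputs A raises TypeError (joins a None middle), while B returns the even palindrome
-- (see Raises_ block).

-- ===== PORT A =====
-- counting loop: 'if char in letter_counts: letter_counts[char] += 1 else: letter_counts[char] = 1'
def pvA_count (cs : List Char) : PySem.Dict Char Int :=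
  cs.foldl (fun d ch =>
    if d.contains ch then d.insert ch (d.getD ch 0 + 1) else d.insert ch 1)
    PySem.Dict.empty

-- the odd-count scan over letter_counts.items() with its 'break'
def pvA_scan : List (Char × Int) → Int → Option Char → Int × Bool × Option Char
  | [], odd, mid => (odd, false, mid)
  | (letter, count) :: rest, odd, mid =>
    if PySem.Int.mod count 2 != 0 then
      if odd + 1 > 1 then (odd + 1, true, some letter)
      else pvA_scan rest (odd + 1) (some letter)
    else pvA_scan rest odd mid

def make_palindrome1 (txt : String) : String :=
  let letter_counts := pvA_count txt.toList
  let r := pvA_scan letter_counts.items 0 none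
  if r.2.1 then "impossible"
  else
    let sorted_letters := PySem.List.sorted letter_counts.keys (fun x => x) false
    let palindrome_list : List (List Char) :=
      sorted_letters.foldl (fun acc letter =>
        acc ++ [List.replicate (PySem.Int.floordiv (letter_counts.getD letter 0) 2).toNat letter]) []
    let palindrome_base := palindrome_list.flatten  -- ''.join of one-letter-run strings
    match r.2.2 with
    | some m => String.ofList (palindrome_base ++ [m] ++ palindrome_base.reverse)
    | none => ""  -- Python raises TypeError here (middle_letter is None); excluded by Pre_

-- ===== PORT B =====
-- the while loop over the sorted characters: consume an adjacent equal pair into the half,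
-- or an unpaired character as the middle; a second unpaired one returns none ('impossible')
def pvB_scan : List Char → Option Char → Option (List Char × Option Char)
  | [], mid => some ([], mid)
  | [a], mid =>
    match mid with
    | some _ => none
    | none => some ([], some a)
  | a :: b :: rest, mid =>
    if a == b then (pvB_scan rest mid).map (fun p => (a :: p.1, p.2))
    else
      match mid with
      | some _ => none
      | none => pvB_scan (b :: rest) (some a)

def make_palindrome1_alt (txt : String) : String :=
  let s := PySem.List.sorted txt.toList (fun x => x) false
  match pvB_scan s none with
  | none => "impossible"
  | some (half, mid) =>
    String.ofList (half ++ (match mid with | some m => [m] | none => []) ++ half.reverse)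

-- ===== PRECONDITION & SPEC =====
-- Pre_ excludes exactly the inputs on which every letter occurs an even number of times (including ""):
-- there A's ''.join((base, None, base[::-1])) raises TypeError, so A returns no value.
def Pre_make_palindrome1 (txt : String) : Prop :=
  (txt.toList.any (fun c => txt.toList.count c % 2 == 1)) = true
instance (txt : String) : Decidable (Pre_make_palindrome1 txt) := by
  unfold Pre_make_palindrome1; infer_instance
def pvWitness_make_palindrome1 : String := "a"

-- A raises TypeError on every input whose letters all have even counts; B returns the even palindrome there.
def Raises_make_palindrome1 (txt : String) : Prop :=
  (txt.toList.all (fun c => txt.toList.count c % 2 == 0)) = true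
instance (txt : String) : Decidable (Raises_make_palindrome1 txt) := by
  unfold Raises_make_palindrome1; infer_instance
def pvRaiseWitness_make_palindrome1 : String := "aa"
def pvRaiseWitnessOut_make_palindrome1 : String := "aa"

def Spec_make_palindrome1 (txt : String) (out : String) : Prop := out = make_palindrome1_alt txt
instance (txt : String) (out : String) : Decidable (Spec_make_palindrome1 txt out) := by unfold Spec_make_palindrome1; infer_instance

-- ===== CLAIM (what is proved, stated in full; the proofs are below) =====
def Claim_equal_make_palindrome1 : Prop := ∀ (txt : String), Dom_make_palindrome1 txt → Pre_make_palindrome1 txt → Spec_make_palindrome1 txt (make_palindrome1 txt)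
def Claim_raises_make_palindrome1 : Prop := (∀ (txt : String), Dom_make_palindrome1 txt → Raises_make_palindrome1 txt → ¬ Pre_make_palindrome1 txt) ∧ (Dom_make_palindrome1 (pvRaiseWitness_make_palindrome1) ∧ Raises_make_palindrome1 (pvRaiseWitness_make_palindrome1) ∧ make_palindrome1_alt (pvRaiseWitness_make_palindrome1) = pvRaiseWitnessOut_make_palindrome1)

-- ===== LEMMAS AND PROOFS =====

-- A-side characterisations ------------------------------------------------

lemma pvA_count_eq_counter (cs : List Char) : pvA_count cs = PySem.Dict.counter cs := by
  unfold pvA_count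
  rw [← PySem.Dict.foldl_insert_getD_add_one_eq_counter]
  congr 1
  funext d ch
  by_cases h : d.contains ch
  · simp [h]
  · rw [if_neg h, PySem.Dict.getD_of_not_contains]
    · norm_num
    · exact eq_false_of_ne_true h

lemma pvA_scan_one (l : List (Char × Int)) (mid : Option Char) :
    pvA_scan l 1 mid =
      match l.filter (fun pr => PySem.Int.mod pr.2 2 != 0) with
      | [] => (1, false, mid)
      | x :: _ => (2, true, some x.1) := by
  induction l generalizing mid with
  | nil => rfl
  | cons a rest ih =>
    obtain ⟨letter, count⟩ := a
    by_cases h : count % 2 = 1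
    · simp [pvA_scan, h]
    · simp [pvA_scan, h, ih]

lemma pvA_scan_zero (l : List (Char × Int)) (mid : Option Char) :
    pvA_scan l 0 mid =
      match l.filter (fun pr => PySem.Int.mod pr.2 2 != 0) with
      | [] => (0, false, mid)
      | [x] => (1, false, some x.1)
      | _ :: y :: _ => (2, true, some y.1) := by
  induction l generalizing mid with
  | nil => rfl
  | cons a rest ih =>
    obtain ⟨letter, count⟩ := a
    by_cases h : count % 2 = 1
    · have hc : (PySem.Int.mod count 2 != 0) = true := by simp [h]
      simp only [pvA_scan]
      rw [if_pos hc, if_neg (by norm_num), show (0:Int)+1 = 1 from by norm_num, pvA_scan_one,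
        List.filter_cons]
      simp only [hc, if_true]
      cases hr : rest.filter (fun pr => PySem.Int.mod pr.2 2 != 0) <;> rfl
    · simp [pvA_scan, h, ih]

lemma pv_pred_eq (cs : List Char) :
    (fun k => PySem.Int.mod ((cs.count k : Nat) : Int) 2 != 0) = (fun c => cs.count c % 2 == 1) := by
  funext k
  have h : PySem.Int.mod ((cs.count k : Nat) : Int) 2 = ((cs.count k % 2 : Nat) : Int) := by
    exact_mod_cast PySem.Int.mod_natCast (cs.count k) 2
  rcases Nat.mod_two_eq_zero_or_one (cs.count k) with h2 | h2 <;> simp [h2] <;> omega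

lemma pv_repl_eq (cs : List Char) :
    (fun letter => List.replicate (PySem.Int.floordiv ((PySem.Dict.counter cs).getD letter 0) 2).toNat letter)
      = (fun c => List.replicate (cs.count c / 2) c) := by
  funext c
  rw [PySem.Dict.getD_counter]
  have h : PySem.Int.floordiv ((cs.count c : Nat) : Int) 2 = ((cs.count c / 2 : Nat) : Int) := by
    exact_mod_cast PySem.Int.floordiv_natCast (cs.count c) 2
  rw [h, Int.toNat_natCast]

-- B-side: the sorted text decomposes into letter groups ---------------------

lemma pv_count_flatMap (L : List Char) (n : Char → Nat) (a : Char) (hnd : L.Nodup) :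
    (L.flatMap fun c => List.replicate (n c) c).count a = if a ∈ L then n a else 0 := by
  induction L with
  | nil => simp
  | cons c tl ih =>
    rcases List.nodup_cons.mp hnd with ⟨hc, hnd'⟩
    simp only [List.flatMap_cons, List.count_append, List.count_replicate, ih hnd',
      List.mem_cons]
    by_cases h : a = c
    · subst h; simp [hc]
    · simp [h, Ne.symm h]

lemma pv_flatMap_perm (cs : List Char) (L : List Char) (hperm : L.Perm (PySem.Set.ofList cs))
    (hnd : L.Nodup) :
    (L.flatMap fun c => List.replicate (cs.count c) c).Perm cs := by
  rw [List.perm_iff_count]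
  intro a
  rw [pv_count_flatMap _ _ _ hnd]
  by_cases h : a ∈ cs
  · rw [if_pos (hperm.mem_iff.mpr ((PySem.Set.mem_ofList _ _).mpr h))]
  · rw [if_neg (fun hm => h ((PySem.Set.mem_ofList _ _).mp (hperm.mem_iff.mp hm))),
      List.count_eq_zero_of_not_mem h]

lemma pv_flatMap_sorted (L : List Char) (n : Char → Nat) (hlt : L.Pairwise (· < ·)) :
    (L.flatMap fun c => List.replicate (n c) c).Pairwise (· ≤ ·) := by
  induction L with
  | nil => simp
  | cons c tl ih =>
    rcases List.pairwise_cons.mp hlt with ⟨hc, htl⟩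
    simp only [List.flatMap_cons]
    rw [List.pairwise_append]
    refine ⟨?_, ih htl, ?_⟩
    · exact List.pairwise_iff_forall_sublist.mpr (fun h => by
        rcases List.eq_of_mem_replicate (h.subset (List.mem_cons_self)) with rfl
        rcases List.eq_of_mem_replicate (h.subset (List.mem_cons_of_mem _ List.mem_cons_self)) with rfl
        exact le_refl _)
    · intro x hx y hy
      rcases List.eq_of_mem_replicate hx with rfl
      rcases List.mem_flatMap.mp hy with ⟨d, hd, hyd⟩
      rw [List.eq_of_mem_replicate hyd]
      exact le_of_lt (hc d hd)

lemma pv_sorted_decomp (cs : List Char) :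
    PySem.List.sorted cs (fun x => x) false =
      (PySem.List.sorted (PySem.Set.ofList cs) (fun x => x) false).flatMap
        (fun c => List.replicate (cs.count c) c) := by
  have hlt := PySem.List.sorted_ofList_pairwise_lt (xs := cs)
  have hperm : (PySem.List.sorted (PySem.Set.ofList cs) (fun x => x) false).Perm (PySem.Set.ofList cs) :=
    PySem.List.sorted_perm _ _ _
  have hnd : (PySem.List.sorted (PySem.Set.ofList cs) (fun x => x) false).Nodup :=
    hlt.imp (fun h => ne_of_lt h)
  exact PySem.List.sorted_id_eq_of_perm_of_pairwise _ _
    (pv_flatMap_perm cs _ hperm hnd) (pv_flatMap_sorted _ _ hlt)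

-- B-side: the pairing scan over a group, then over a list of groups --------

lemma pvB_scan_replicate (n : Nat) (c : Char) (rest : List Char) (mid : Option Char)
    (hc : c ∉ rest) :
    pvB_scan (List.replicate n c ++ rest) mid =
      if n % 2 = 0 then
        (pvB_scan rest mid).map (fun p => (List.replicate (n / 2) c ++ p.1, p.2))
      else
        match mid with
        | some _ => none
        | none => (pvB_scan rest (some c)).map (fun p => (List.replicate (n / 2) c ++ p.1, p.2)) := by
  induction n using Nat.twoStepInduction generalizing mid with
  | zero =>
    simp only [List.replicate, List.nil_append, Nat.zero_mod]
    cases pvB_scan rest mid <;> simp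
  | one =>
    cases rest with
    | nil => cases mid <;> rfl
    | cons r rs =>
      have hne : (c == r) = false := by
        simp only [beq_eq_false_iff_ne, ne_eq]
        intro h; exact hc (h ▸ List.mem_cons_self)
      cases mid with
      | some m => simp [pvB_scan, hne]
      | none =>
        simp only [List.replicate, List.nil_append, List.singleton_append, pvB_scan, hne,
          Bool.false_eq_true]
        cases pvB_scan (r :: rs) (some c) <;> simp
  | more n ih _ =>
    have : List.replicate (n + 2) c ++ rest = c :: c :: (List.replicate n c ++ rest) := by
      simp [List.replicate_succ]
    rw [this]
    simp only [pvB_scan, beq_self_eq_true, if_pos]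
    rw [ih mid]
    have hdiv : (n + 2) / 2 = n / 2 + 1 := by omega
    have hmod : (n + 2) % 2 = n % 2 := by omega
    rw [hdiv, hmod]
    by_cases h : n % 2 = 0
    · rw [if_pos h, if_pos h, Option.map_map]
      cases pvB_scan rest mid <;> simp [List.replicate_succ]
    · rw [if_neg h, if_neg h]
      cases mid with
      | some m => rfl
      | none =>
        rw [Option.map_map]
        cases pvB_scan rest (some c) <;> simp [List.replicate_succ]

lemma pvB_scan_groups (L : List Char) (n : Char → Nat) (hnd : L.Nodup) (mid : Option Char) :
    pvB_scan (L.flatMap fun c => List.replicate (n c) c) mid =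
      match mid, L.filter (fun c => n c % 2 == 1) with
      | none, [] => some (L.flatMap fun c => List.replicate (n c / 2) c, none)
      | none, [c] => some (L.flatMap fun c => List.replicate (n c / 2) c, some c)
      | none, _ :: _ :: _ => none
      | some m, [] => some (L.flatMap fun c => List.replicate (n c / 2) c, some m)
      | some _, _ :: _ => none := by
  induction L generalizing mid with
  | nil => cases mid <;> rfl
  | cons c tl ih =>
    rcases List.nodup_cons.mp hnd with ⟨hc, hnd'⟩
    have hcf : c ∉ tl.flatMap fun d => List.replicate (n d) d := by
      intro hm
      rcases List.mem_flatMap.mp hm with ⟨d, hd, hcd⟩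
      exact hc (List.eq_of_mem_replicate hcd ▸ hd)
    simp only [List.flatMap_cons, List.filter_cons]
    rw [pvB_scan_replicate _ _ _ _ hcf]
    by_cases h : n c % 2 = 0
    · have hb : (n c % 2 == 1) = false := by simp; omega
      rw [if_pos h, ih hnd' mid, hb]
      cases mid with
      | none => cases tl.filter (fun c => n c % 2 == 1) with
        | nil => simp
        | cons x xs => cases xs <;> simp
      | some m => cases tl.filter (fun c => n c % 2 == 1) with
        | nil => simp
        | cons x xs => simp
    · have hb : (n c % 2 == 1) = true := by simp; omega
      rw [if_neg h, hb]
      cases mid with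
      | some m => simp
      | none =>
        rw [ih hnd' (some c)]
        cases tl.filter (fun c => n c % 2 == 1) with
        | nil => simp
        | cons x xs => simp

-- main ----------------------------------------------------------------------

lemma pv_main (txt : String)
    (hpre : (txt.toList.any (fun c => txt.toList.count c % 2 == 1)) = true) :
    make_palindrome1 txt = make_palindrome1_alt txt := by
  unfold make_palindrome1 make_palindrome1_alt
  simp only []
  set cs := txt.toList with hcs
  rw [pvA_count_eq_counter]
  have hitems := PySem.Dict.items_counter (κ := Char) cs
  have hkeys := PySem.Dict.keys_counter (κ := Char) cs
  set S : List Char := PySem.Set.ofList cs with hS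
  set L : List Char := PySem.List.sorted S (fun x => x) false with hL
  have hlt : L.Pairwise (· < ·) := by
    rw [hL, hS]; exact PySem.List.sorted_ofList_pairwise_lt cs
  have hnd : L.Nodup := hlt.imp (fun h => ne_of_lt h)
  set f : Char → Char × Int := fun k => (k, (cs.count k : Int)) with hf
  have hfilt : ((PySem.Dict.counter cs).items.filter (fun pr => PySem.Int.mod pr.2 2 != 0))
      = (S.filter (fun c => cs.count c % 2 == 1)).map f := by
    rw [hitems, List.filter_map]
    congr 1
    rw [← pv_pred_eq cs]
    rfl
  have hperm : L.Perm S := PySem.List.sorted_perm _ _ _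
  have hoddsperm : (L.filter (fun c => cs.count c % 2 == 1)).Perm
      (S.filter (fun c => cs.count c % 2 == 1)) := hperm.filter _
  have hbase : (PySem.List.sorted (PySem.Dict.counter cs).keys (fun x => x) false).foldl
        (fun acc letter => acc ++ [List.replicate (PySem.Int.floordiv ((PySem.Dict.counter cs).getD letter 0) 2).toNat letter]) []
      = L.map (fun c => List.replicate (cs.count c / 2) c) := by
    rw [PySem.List.foldl_append_singleton_eq_map, hkeys, pv_repl_eq]
    exact List.nil_append _
  rw [pvA_scan_zero, hfilt, hbase, pv_sorted_decomp cs, ← hS, ← hL,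
    pvB_scan_groups L (fun c => cs.count c) hnd none]
  cases hfs : S.filter (fun c => cs.count c % 2 == 1) with
  | nil =>
    exfalso
    simp only [List.any_eq_true] at hpre
    obtain ⟨c, hc, hodd⟩ := hpre
    have : c ∈ S.filter (fun c => cs.count c % 2 == 1) :=
      List.mem_filter.mpr ⟨(PySem.Set.mem_ofList _ _).mpr hc, hodd⟩
    rw [hfs] at this; exact absurd this (List.not_mem_nil)
  | cons m rest =>
    cases rest with
    | nil =>
      have hodds : L.filter (fun c => cs.count c % 2 == 1) = [m] := by
        rw [hfs] at hoddsperm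
        exact List.perm_singleton.mp hoddsperm
      simp only [hodds, List.map_cons, List.map_nil]
      simp [List.flatMap_def, hf]
    | cons y t =>
      have hlen : (L.filter (fun c => cs.count c % 2 == 1)).length = (m :: y :: t).length := by
        rw [← hfs]; exact hoddsperm.length_eq
      cases hLf : L.filter (fun c => cs.count c % 2 == 1) with
      | nil => rw [hLf] at hlen; simp at hlen
      | cons a bs =>
        cases bs with
        | nil => rw [hLf] at hlen; simp at hlen
        | cons b cs' => simp [List.map_cons]

-- ===== VERDICT (by name: the statement is the Claim_ definition above) =====
theorem make_palindrome1_spec : Claim_equal_make_palindrome1 := by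
  intro txt _ hpre
  unfold Spec_make_palindrome1
  exact pv_main txt hpre

@[simp]
theorem make_palindrome1_raises : Claim_raises_make_palindrome1 := by
  unfold Claim_raises_make_palindrome1
  refine ⟨?_, by decide, by decide, by rfl⟩
  intro txt _ hr hp
  unfold Pre_make_palindrome1 at hp
  unfold Raises_make_palindrome1 at hr
  simp only [List.any_eq_true, List.all_eq_true] at hp hr
  obtain ⟨c, hc, hodd⟩ := hp
  have := hr c hc
  simp only [beq_iff_eq] at hodd this
  omega
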